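-- pv_equiv track=rewrite | github.com/SaadLARAJ/Vidocq | src/core/ontology.py | get_allowed_relations_for_types
-- ===== SOURCE A (Python) =====
-- RELATION_CONSTRAINTS: dict[str, list[tuple[str, str]]] = {
--     "OWNS": [
--         ("PERSON", "ORGANIZATION"),
--         ("PERSON", "CRYPTO_WALLET"),
--         ("ORGANIZATION", "ORGANIZATION"),
--         ("ORGANIZATION", "CRYPTO_WALLET"),
--     ],
--     "FUNDS": [
--         ("PERSON", "PERSON"),
--         ("PERSON", "ORGANIZATION"),
--         ("ORGANIZATION", "PERSON"),
--         ("ORGANIZATION", "ORGANIZATION"),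
--         ("ORGANIZATION", "EVENT"),
--     ],
--     "EMPLOYS": [
--         ("ORGANIZATION", "PERSON"),
--     ],
--     "PARTNERS_WITH": [
--         ("PERSON", "PERSON"),
--         ("ORGANIZATION", "ORGANIZATION"),
--         ("PERSON", "ORGANIZATION"),
--     ],
--     "OPPOSES": [
--         ("PERSON", "PERSON"),
--         ("ORGANIZATION", "ORGANIZATION"),
--         ("PERSON", "ORGANIZATION"),
--     ],
--     "FAMILY_OF": [
--         ("PERSON", "PERSON"),
--     ],
--     "LOCATED_IN": [
--         ("PERSON", "LOCATION"),
--         ("ORGANIZATION", "LOCATION"),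
--         ("EVENT", "LOCATION"),
--     ],
--     "ATTENDED": [
--         ("PERSON", "EVENT"),
--         ("ORGANIZATION", "EVENT"),
--     ],
--     "ACQUIRED": [
--         ("PERSON", "ORGANIZATION"),
--         ("ORGANIZATION", "ORGANIZATION"),
--     ],
--     "MET_WITH": [
--         ("PERSON", "PERSON"),
--         ("PERSON", "ORGANIZATION"),
--     ],
--     "INVESTED_IN": [
--         ("PERSON", "ORGANIZATION"),
--         ("ORGANIZATION", "ORGANIZATION"),
--     ],
--     "CONTROLS": [
--         ("PERSON", "ORGANIZATION"),
--         ("ORGANIZATION", "ORGANIZATION"),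
--         ("PERSON", "CRYPTO_WALLET"),
--     ],
-- }
--
-- def get_allowed_relations_for_types(
--     subject_type: str,
--     object_type: str
-- ) -> list[str]:
--     """
--     Get all allowed relation types between two entity types.
--
--     Args:
--         subject_type: Type of subject entity
--         object_type: Type of object entity
--
--     Returns:
--         List of allowed relation types
--
--     Example:
--         >>> get_allowed_relations_for_types("PERSON", "ORGANIZATION")
--         ["OWNS", "FUNDS", "PARTNERS_WITH", "OPPOSES", "MET_WITH", "INVESTED_IN", "CONTROLS"]
--     """
--     allowed = []
--     for relation, pairs in RELATION_CONSTRAINTS.items():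
--         if (subject_type, object_type) in pairs:
--             allowed.append(relation)
--     return allowed
-- ===== SOURCE B (Python) =====
-- # B: the constraint table flattened into a precomputed decision tree over the two
-- # type names; no table scan (and no table) remains at call time.
--
-- def get_allowed_relations_for_types(subject_type: str, object_type: str) -> list[str]:
--     if subject_type == "PERSON":
--         if object_type == "PERSON":
--             return ["FUNDS", "PARTNERS_WITH", "OPPOSES", "FAMILY_OF", "MET_WITH"]
--         if object_type == "ORGANIZATION":
--             return ["OWNS", "FUNDS", "PARTNERS_WITH", "OPPOSES", "ACQUIRED",
--                     "MET_WITH", "INVESTED_IN", "CONTROLS"]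
--         if object_type == "CRYPTO_WALLET":
--             return ["OWNS", "CONTROLS"]
--         if object_type == "LOCATION":
--             return ["LOCATED_IN"]
--         if object_type == "EVENT":
--             return ["ATTENDED"]
--         return []
--     if subject_type == "ORGANIZATION":
--         if object_type == "PERSON":
--             return ["FUNDS", "EMPLOYS"]
--         if object_type == "ORGANIZATION":
--             return ["OWNS", "FUNDS", "PARTNERS_WITH", "OPPOSES", "ACQUIRED",
--                     "INVESTED_IN", "CONTROLS"]
--         if object_type == "CRYPTO_WALLET":
--             return ["OWNS"]
--         if object_type == "LOCATION":
--             return ["LOCATED_IN"]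
--         if object_type == "EVENT":
--             return ["FUNDS", "ATTENDED"]
--         return []
--     if subject_type == "EVENT":
--         if object_type == "LOCATION":
--             return ["LOCATED_IN"]
--         return []
--     return []
-- ===== Notes on version B (the rewrite author's own statement) =====
-- stated objective: alternative
-- what changed: B replaces A's per-call scan over RELATION_CONSTRAINTS (with an inner pair-membership test) by a precomputed decision tree over the two type names: branch on subject_type, then object_type, and return the relation list directly; no table or scan remains at call time.
import Mathlib
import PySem

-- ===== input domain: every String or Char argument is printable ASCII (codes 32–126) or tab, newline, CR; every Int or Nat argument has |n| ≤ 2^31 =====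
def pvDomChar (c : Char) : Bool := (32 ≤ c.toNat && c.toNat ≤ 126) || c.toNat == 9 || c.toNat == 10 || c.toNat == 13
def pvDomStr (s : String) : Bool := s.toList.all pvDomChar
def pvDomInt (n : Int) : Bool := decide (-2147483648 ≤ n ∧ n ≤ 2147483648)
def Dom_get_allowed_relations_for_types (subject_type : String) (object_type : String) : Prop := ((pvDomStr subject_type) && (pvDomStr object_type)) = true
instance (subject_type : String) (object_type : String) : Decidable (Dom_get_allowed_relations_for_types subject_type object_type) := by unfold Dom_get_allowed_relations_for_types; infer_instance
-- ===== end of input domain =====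

-- B flattens the constraint table into a precomputed decision tree over the two type
-- names, replacing A's per-call table scan (objective: alternative).

set_option maxRecDepth 4000

-- ===== PORT A =====
-- RELATION_CONSTRAINTS.items(), in insertion order
def pvRelationConstraints : List (String × List (String × String)) :=
  [ ("OWNS", [("PERSON", "ORGANIZATION"), ("PERSON", "CRYPTO_WALLET"),
              ("ORGANIZATION", "ORGANIZATION"), ("ORGANIZATION", "CRYPTO_WALLET")]),
    ("FUNDS", [("PERSON", "PERSON"), ("PERSON", "ORGANIZATION"), ("ORGANIZATION", "PERSON"),
               ("ORGANIZATION", "ORGANIZATION"), ("ORGANIZATION", "EVENT")]),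
    ("EMPLOYS", [("ORGANIZATION", "PERSON")]),
    ("PARTNERS_WITH", [("PERSON", "PERSON"), ("ORGANIZATION", "ORGANIZATION"),
                       ("PERSON", "ORGANIZATION")]),
    ("OPPOSES", [("PERSON", "PERSON"), ("ORGANIZATION", "ORGANIZATION"),
                 ("PERSON", "ORGANIZATION")]),
    ("FAMILY_OF", [("PERSON", "PERSON")]),
    ("LOCATED_IN", [("PERSON", "LOCATION"), ("ORGANIZATION", "LOCATION"),
                    ("EVENT", "LOCATION")]),
    ("ATTENDED", [("PERSON", "EVENT"), ("ORGANIZATION", "EVENT")]),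
    ("ACQUIRED", [("PERSON", "ORGANIZATION"), ("ORGANIZATION", "ORGANIZATION")]),
    ("MET_WITH", [("PERSON", "PERSON"), ("PERSON", "ORGANIZATION")]),
    ("INVESTED_IN", [("PERSON", "ORGANIZATION"), ("ORGANIZATION", "ORGANIZATION")]),
    ("CONTROLS", [("PERSON", "ORGANIZATION"), ("ORGANIZATION", "ORGANIZATION"),
                  ("PERSON", "CRYPTO_WALLET")]) ]

def get_allowed_relations_for_types (subject_type : String) (object_type : String) : List String :=
  pvRelationConstraints.foldl
    (fun allowed rp =>
      if (subject_type, object_type) ∈ rp.2 then allowed ++ [rp.1] else allowed)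
    []

-- ===== PORT B =====
-- precomputed decision tree: branch on subject_type, then object_type
def get_allowed_relations_for_types_alt (subject_type : String) (object_type : String) : List String :=
  if subject_type == "PERSON" then
    if object_type == "PERSON" then
      ["FUNDS", "PARTNERS_WITH", "OPPOSES", "FAMILY_OF", "MET_WITH"]
    else if object_type == "ORGANIZATION" then
      ["OWNS", "FUNDS", "PARTNERS_WITH", "OPPOSES", "ACQUIRED",
       "MET_WITH", "INVESTED_IN", "CONTROLS"]
    else if object_type == "CRYPTO_WALLET" then
      ["OWNS", "CONTROLS"]
    else if object_type == "LOCATION" then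
      ["LOCATED_IN"]
    else if object_type == "EVENT" then
      ["ATTENDED"]
    else []
  else if subject_type == "ORGANIZATION" then
    if object_type == "PERSON" then
      ["FUNDS", "EMPLOYS"]
    else if object_type == "ORGANIZATION" then
      ["OWNS", "FUNDS", "PARTNERS_WITH", "OPPOSES", "ACQUIRED",
       "INVESTED_IN", "CONTROLS"]
    else if object_type == "CRYPTO_WALLET" then
      ["OWNS"]
    else if object_type == "LOCATION" then
      ["LOCATED_IN"]
    else if object_type == "EVENT" then
      ["FUNDS", "ATTENDED"]
    else []
  else if subject_type == "EVENT" then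
    if object_type == "LOCATION" then ["LOCATED_IN"] else []
  else []

-- ===== PRECONDITION & SPEC =====
def Spec_get_allowed_relations_for_types (subject_type : String) (object_type : String) (out : List String) : Prop := out = get_allowed_relations_for_types_alt subject_type object_type
instance (subject_type : String) (object_type : String) (out : List String) : Decidable (Spec_get_allowed_relations_for_types subject_type object_type out) := by unfold Spec_get_allowed_relations_for_types; infer_instance

-- ===== CLAIM (what is proved, stated in full; the proofs are below) =====
def Claim_equal_get_allowed_relations_for_types : Prop := ∀ (subject_type : String) (object_type : String), Dom_get_allowed_relations_for_types subject_type object_type → Spec_get_allowed_relations_for_types subject_type object_type (get_allowed_relations_for_types subject_type object_type)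

-- ===== LEMMAS AND PROOFS =====

-- if the subject is none of the three types occurring in the table, A returns []
theorem pv_A_nil_s (s o : String) (h1 : s ≠ "PERSON") (h2 : s ≠ "ORGANIZATION")
    (h3 : s ≠ "EVENT") : get_allowed_relations_for_types s o = [] := by
  simp [get_allowed_relations_for_types, pvRelationConstraints, List.foldl,
    Prod.mk.injEq, h1, h2, h3]

-- if the object is none of the five types occurring in the table, A returns []
theorem pv_A_nil_o (s o : String) (g1 : o ≠ "PERSON") (g2 : o ≠ "ORGANIZATION")
    (g3 : o ≠ "EVENT") (g4 : o ≠ "LOCATION") (g5 : o ≠ "CRYPTO_WALLET") :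
    get_allowed_relations_for_types s o = [] := by
  simp [get_allowed_relations_for_types, pvRelationConstraints, List.foldl,
    Prod.mk.injEq, g1, g2, g3, g4, g5]

theorem pv_B_nil_s (s o : String) (h1 : s ≠ "PERSON") (h2 : s ≠ "ORGANIZATION")
    (h3 : s ≠ "EVENT") : get_allowed_relations_for_types_alt s o = [] := by
  simp [get_allowed_relations_for_types_alt, h1, h2, h3]

theorem pv_B_nil_o (s o : String) (g1 : o ≠ "PERSON") (g2 : o ≠ "ORGANIZATION")
    (g3 : o ≠ "EVENT") (g4 : o ≠ "LOCATION") (g5 : o ≠ "CRYPTO_WALLET") :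
    get_allowed_relations_for_types_alt s o = [] := by
  simp [get_allowed_relations_for_types_alt, g1, g2, g3, g4, g5]

theorem pv_main (s o : String) :
    get_allowed_relations_for_types s o = get_allowed_relations_for_types_alt s o := by
  by_cases h1 : s = "PERSON" <;> by_cases h2 : s = "ORGANIZATION" <;> by_cases h3 : s = "EVENT" <;>
    by_cases g1 : o = "PERSON" <;> by_cases g2 : o = "ORGANIZATION" <;> by_cases g3 : o = "EVENT" <;>
      by_cases g4 : o = "LOCATION" <;> by_cases g5 : o = "CRYPTO_WALLET" <;>
        first
          | (subst_vars; decide)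
          | exact (pv_A_nil_s _ _ h1 h2 h3).trans (pv_B_nil_s _ _ h1 h2 h3).symm
          | exact (pv_A_nil_o _ _ g1 g2 g3 g4 g5).trans (pv_B_nil_o _ _ g1 g2 g3 g4 g5).symm

-- ===== VERDICT (by name: the statement is the Claim_ definition above) =====
theorem get_allowed_relations_for_types_spec : Claim_equal_get_allowed_relations_for_types := by
  intro s o _
  unfold Spec_get_allowed_relations_for_types
  exact pv_main s o
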